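-- pv_equiv track=rewrite | github.com/minu0508/Algorithm | Python/Programmers/코딩 기초 트레이닝/커피 심부름.py | solution
-- ===== SOURCE A (Python) =====
-- def solution(order):
--     answer = 0
--     for i in order:
--         if (i.count("latte") >= 1):
--             answer += 5000
--         elif (i.count("americano") >= 1):
--             answer += 4500
--         else:
--             answer += 4500
--     return answer
-- ===== SOURCE B (Python) =====
-- def solution(order):
--     # divide and conquer: split the order list in half, solve each half, add.
--     if not order:
--         return 0
--     if len(order) == 1:
--         return 5000 if "latte" in order[0] else 4500
--     mid = len(order) // 2
--     return solution(order[:mid]) + solution(order[mid:])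
-- ===== Notes on version B (the rewrite author's own statement) =====
-- stated objective: alternative
-- what changed: Replaces A's left-to-right branch-and-accumulate loop (whose americano/else branches both add 4500) by a binary divide-and-conquer recursion: split the list in half, solve each half recursively, add the two sums; the leaf case prices one order with a single substring test.
import Mathlib
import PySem

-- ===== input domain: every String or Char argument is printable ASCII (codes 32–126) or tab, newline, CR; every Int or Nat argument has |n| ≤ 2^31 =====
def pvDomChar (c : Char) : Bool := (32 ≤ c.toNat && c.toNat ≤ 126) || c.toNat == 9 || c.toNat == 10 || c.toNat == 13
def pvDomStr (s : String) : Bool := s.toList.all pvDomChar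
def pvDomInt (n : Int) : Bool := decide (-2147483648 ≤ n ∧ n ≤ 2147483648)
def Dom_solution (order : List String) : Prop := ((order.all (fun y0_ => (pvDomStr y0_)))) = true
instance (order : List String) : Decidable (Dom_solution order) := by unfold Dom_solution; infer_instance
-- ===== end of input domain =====

-- B replaces A's left-to-right branch-and-accumulate loop (whose americano/else branches both
-- add 4500) by a binary divide-and-conquer recursion (objective: alternative).

-- ===== PORT A =====
def solution (order : List String) : Int :=
  order.foldl
    (fun answer i =>
      if PySem.Str.count i "latte" ≥ 1 then answer + 5000
      else if PySem.Str.count i "americano" ≥ 1 then answer + 4500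
      else answer + 4500)
    0

-- ===== PORT B =====
def solution_alt (order : List String) : Int :=
  if order = [] then 0
  else if order.length = 1 then
    (if PySem.Str.isIn "latte" order.headI then 5000 else 4500)
  else
    let mid : Int := PySem.Int.floordiv (order.length : Int) 2
    solution_alt (PySem.List.slice order none (some mid)) +
    solution_alt (PySem.List.slice order (some mid) none)
termination_by order.length
decreasing_by
  all_goals
    rw [show PySem.Int.floordiv ((order.length : Nat) : Int) 2 = ((order.length / 2 : Nat) : Int)
        from PySem.Int.floordiv_natCast order.length 2]
  · rw [PySem.List.slice_to_natCast]
    have hne : order ≠ [] := by assumption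
    have : 0 < order.length := List.length_pos_iff.mpr hne
    simp only [List.length_take]
    omega
  · rw [PySem.List.slice_from_natCast]
    have hne : order ≠ [] := by assumption
    have : 0 < order.length := List.length_pos_iff.mpr hne
    simp only [List.length_drop]
    omega

-- ===== PRECONDITION & SPEC =====
def Spec_solution (order : List String) (out : Int) : Prop := out = solution_alt order
instance (order : List String) (out : Int) : Decidable (Spec_solution order out) := by unfold Spec_solution; infer_instance

-- ===== CLAIM (what is proved, stated in full; the proofs are below) =====
def Claim_equal_solution : Prop := ∀ (order : List String), Dom_solution order → Spec_solution order (solution order)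

-- ===== LEMMAS AND PROOFS =====

-- the per-item price both programs effectively assign
def pvPrice (i : String) : Int := if PySem.Str.isIn "latte" i then 5000 else 4500

-- count.go never decreases the accumulator
lemma count_go_le (sub : List Char) : ∀ (fuel : Nat) (s : List Char) (acc : Nat),
    acc ≤ PySem.Chars.count.go sub fuel s acc := by
  intro fuel
  induction fuel with
  | zero => intro s acc; cases s <;> simp [PySem.Chars.count.go]
  | succ n ih =>
    intro s acc
    cases s with
    | nil => simp [PySem.Chars.count.go]
    | cons h t =>
      simp only [PySem.Chars.count.go]
      split
      · exact le_trans (Nat.le_succ acc) (ih _ _)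
      · exact ih _ _

-- count.go stays at acc exactly when sub does not occur (sub ≠ [], enough fuel)
lemma count_go_eq_iff (sub : List Char) (hsub : sub ≠ []) :
    ∀ (fuel : Nat) (s : List Char) (acc : Nat), s.length ≤ fuel →
      (PySem.Chars.count.go sub fuel s acc = acc ↔ ¬ sub <:+: s) := by
  intro fuel
  induction fuel with
  | zero =>
    intro s acc hlen
    have hs : s = [] := List.eq_nil_of_length_eq_zero (Nat.le_zero.mp hlen)
    subst hs
    simp [PySem.Chars.count.go, hsub]
  | succ n ih =>
    intro s acc hlen
    cases s with
    | nil =>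
      simp [PySem.Chars.count.go, hsub]
    | cons h t =>
      simp only [PySem.Chars.count.go]
      split
      next hpre =>
        have hp : sub <+: h :: t := List.isPrefixOf_iff_prefix.mp hpre
        constructor
        · intro heq
          have := count_go_le sub n (List.drop sub.length (h :: t)) (acc + 1)
          omega
        · intro hni; exact absurd hp.isInfix hni
      next hpre =>
        have hnp : ¬ sub <+: h :: t := fun hp => hpre (List.isPrefixOf_iff_prefix.mpr hp)
        have hlt : t.length ≤ n := by simpa using Nat.succ_le_succ_iff.mp hlen
        rw [ih t acc hlt, List.infix_cons_iff]
        tauto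

-- Python's `s.count(sub) >= 1` agrees with `sub in s` for nonempty sub
lemma count_pos_iff_isIn (s sub : List Char) (hsub : sub ≠ []) :
    (1 ≤ PySem.Chars.count s sub) ↔ PySem.Chars.isIn sub s = true := by
  rw [PySem.Chars.isIn_iff_infix]
  unfold PySem.Chars.count
  rw [if_neg (by simpa using hsub)]
  have h := count_go_eq_iff sub hsub s.length s 0 le_rfl
  have hle := count_go_le sub s.length s 0
  constructor
  · intro h1
    by_contra hni
    have h0 := h.mpr hni
    omega
  · intro hi
    rcases Nat.eq_or_lt_of_le hle with heq | hlt
    · exact absurd (h.mp heq.symm) (not_not.mpr hi)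
    · omega

-- A's loop, started at a, adds the pvPrice sum of the list
lemma solution_foldl (order : List String) (a : Int) :
    order.foldl
      (fun answer i =>
        if PySem.Str.count i "latte" ≥ 1 then answer + 5000
        else if PySem.Str.count i "americano" ≥ 1 then answer + 4500
        else answer + 4500)
      a
    = a + (order.map pvPrice).sum := by
  induction order generalizing a with
  | nil => simp
  | cons x xs ih =>
    simp only [List.foldl_cons, List.map_cons, List.sum_cons]
    rw [ih]
    have hiff : (1 ≤ PySem.Chars.count x.toList "latte".toList) ↔
        PySem.Chars.isIn "latte".toList x.toList = true :=
      count_pos_iff_isIn x.toList "latte".toList (by decide)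
    unfold pvPrice
    by_cases hl : PySem.Str.isIn "latte" x = true
    · have hc : PySem.Str.count x "latte" ≥ 1 := by
        have : PySem.Chars.isIn "latte".toList x.toList = true := by
          simpa [PySem.Str.isIn] using hl
        simpa [PySem.Str.count] using hiff.mpr this
      rw [if_pos hc, if_pos hl]; ring
    · have hc : ¬ PySem.Str.count x "latte" ≥ 1 := by
        intro h1
        exact hl (by simpa [PySem.Str.isIn] using hiff.mp (by simpa [PySem.Str.count] using h1))
      rw [if_neg hc, if_neg hl]
      split <;> ring

-- B's divide-and-conquer also sums pvPrice over the list (strong induction on length)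
lemma solution_alt_eq_sum_aux : ∀ (n : Nat) (order : List String), order.length = n →
    solution_alt order = (order.map pvPrice).sum := by
  intro n
  induction n using Nat.strong_induction_on with
  | _ n ih =>
    intro order hlen
    rw [solution_alt]
    by_cases hne : order = []
    · simp [hne]
    rw [if_neg hne]
    by_cases h1 : order.length = 1
    · obtain ⟨x, hx⟩ := List.length_eq_one_iff.mp h1
      subst hx
      simp [pvPrice]
    rw [if_neg h1]
    have hpos : 0 < order.length := List.length_pos_iff.mpr hne
    rw [show PySem.Int.floordiv ((order.length : Nat) : Int) 2 = ((order.length / 2 : Nat) : Int)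
        from PySem.Int.floordiv_natCast order.length 2]
    show solution_alt (PySem.List.slice order none (some ((order.length / 2 : Nat) : Int))) +
        solution_alt (PySem.List.slice order (some ((order.length / 2 : Nat) : Int)) none)
      = (List.map pvPrice order).sum
    rw [PySem.List.slice_to_natCast, PySem.List.slice_from_natCast]
    rw [ih (order.take (order.length / 2)).length (by simp only [List.length_take]; omega)
        _ rfl,
      ih (order.drop (order.length / 2)).length (by simp only [List.length_drop]; omega)
        _ rfl]
    rw [← List.sum_append, ← List.map_append, List.take_append_drop]

lemma solution_alt_eq_sum (order : List String) :
    solution_alt order = (order.map pvPrice).sum :=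
  solution_alt_eq_sum_aux order.length order rfl

-- ===== VERDICT (by name: the statement is the Claim_ definition above) =====
theorem solution_spec : Claim_equal_solution := by
  intro order _
  unfold Spec_solution
  rw [solution_alt_eq_sum]
  unfold solution
  simpa using solution_foldl order 0
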